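-- pv_equiv track=rewrite | github.com/MadhuranS/leetcode-practice | vacuum-cleaner-route.py | routeCheck
-- ===== SOURCE A (Python) =====
-- def routeCheck(s: str):
--     pos = [0,0]
--     for char in s:
--         x = pos[0]
--         y = pos[1]
--         if char == 'L':
--             pos = [x - 1, y]
--         elif char == 'R':
--             pos = [x + 1, y]
--         elif char == 'D':
--             pos = [x, y-1]
--         else:
--             pos = [x, y+1]
--     if pos[0] == 0 and pos[1] == 0:
--         return True
--     return False
-- ===== SOURCE B (Python) =====
-- def routeCheck(s: str):
--     # Net displacement from aggregate counts instead of simulating the walk;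
--     # every char that is not L/R/D counts as an up-move, exactly as A's else branch.
--     left = s.count('L')
--     right = s.count('R')
--     down = s.count('D')
--     up = len(s) - left - right - down
--     return right - left == 0 and up - down == 0
-- ===== Notes on version B (the rewrite author's own statement) =====
-- stated objective: simpler
-- what changed: Replaces the per-character position-simulation loop with aggregate character counts: net displacement computed as R-L and (len - L - R - D) - D, zero-tested directly.
import Mathlib
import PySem

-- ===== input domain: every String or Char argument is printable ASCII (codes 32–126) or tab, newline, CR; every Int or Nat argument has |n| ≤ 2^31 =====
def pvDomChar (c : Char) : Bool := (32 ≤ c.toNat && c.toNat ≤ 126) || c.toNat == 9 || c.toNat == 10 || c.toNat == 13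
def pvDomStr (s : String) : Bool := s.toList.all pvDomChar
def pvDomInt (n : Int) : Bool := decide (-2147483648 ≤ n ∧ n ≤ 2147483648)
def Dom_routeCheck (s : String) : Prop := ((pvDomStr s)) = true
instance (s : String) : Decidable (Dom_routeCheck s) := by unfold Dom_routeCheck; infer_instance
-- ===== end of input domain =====

-- B replaces A's per-character position simulation with aggregate character counts (same cost, simpler).

-- ===== PORT A =====
def routeCheck (s : String) : Bool :=
  let pos := s.toList.foldl (fun pos char =>
    let x := pos.1
    let y := pos.2
    if char = 'L' then (x - 1, y)
    else if char = 'R' then (x + 1, y)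
    else if char = 'D' then (x, y - 1)
    else (x, y + 1)) ((0 : Int), (0 : Int))
  if pos.1 = 0 ∧ pos.2 = 0 then true else false

-- ===== PORT B =====
def routeCheck_alt (s : String) : Bool :=
  let left : Int := PySem.Str.count s "L"
  let right : Int := PySem.Str.count s "R"
  let down : Int := PySem.Str.count s "D"
  let up : Int := PySem.Str.len s - left - right - down
  decide (right - left = 0 ∧ up - down = 0)

-- ===== PRECONDITION & SPEC =====
def Spec_routeCheck (s : String) (out : Bool) : Prop := out = routeCheck_alt s
instance (s : String) (out : Bool) : Decidable (Spec_routeCheck s out) := by unfold Spec_routeCheck; infer_instance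

-- ===== CLAIM (what is proved, stated in full; the proofs are below) =====
def Claim_equal_routeCheck : Prop := ∀ (s : String), Dom_routeCheck s → Spec_routeCheck s (routeCheck s)

-- ===== LEMMAS AND PROOFS =====

-- PySem.Chars.count with a single-character needle is List.count.
theorem count_go_singleton (c : Char) : ∀ (fuel : Nat) (cs : List Char) (acc : Nat),
    cs.length ≤ fuel → PySem.Chars.count.go [c] fuel cs acc = acc + cs.count c := by
  intro fuel
  induction fuel with
  | zero =>
    intro cs acc h
    have : cs = [] := List.length_eq_zero_iff.mp (Nat.le_zero.mp h)
    subst this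
    simp [PySem.Chars.count.go]
  | succ n ih =>
    intro cs acc h
    cases cs with
    | nil => simp [PySem.Chars.count.go]
    | cons hd t =>
      simp only [PySem.Chars.count.go]
      by_cases hc : hd = c
      · subst hc
        have hp : List.isPrefixOf [hd] (hd :: t) = true := by
          simp [List.isPrefixOf]
        simp only [hp]
        rw [ih _ _ (by simpa using h)]
        simp
        omega
      · have hp : List.isPrefixOf [c] (hd :: t) = false := by
          simp [List.isPrefixOf]
          exact fun h' => (hc h'.symm).elim
        simp only [hp]
        rw [if_neg (by simp)]
        rw [ih _ _ (by simpa using Nat.le_of_succ_le_succ h)]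
        simp [hc]

theorem count_singleton (cs : List Char) (c : Char) :
    PySem.Chars.count cs [c] = cs.count c := by
  unfold PySem.Chars.count
  simp [List.isEmpty]
  have := count_go_singleton c cs.length cs 0 le_rfl
  omega

-- A's running position, expressed through counts.
theorem fold_pos (cs : List Char) : ∀ (x y : Int),
    cs.foldl (fun pos char =>
      let x := pos.1
      let y := pos.2
      if char = 'L' then (x - 1, y)
      else if char = 'R' then (x + 1, y)
      else if char = 'D' then (x, y - 1)
      else (x, y + 1)) (x, y)
    = (x + cs.count 'R' - cs.count 'L',
       y + ((cs.length : Int) - cs.count 'L' - cs.count 'R' - cs.count 'D') - cs.count 'D') := by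
  induction cs with
  | nil => intro x y; simp
  | cons hd t ih =>
    intro x y
    simp only [List.foldl_cons]
    by_cases hL : hd = 'L'
    · subst hL
      rw [if_pos rfl, ih]
      simp
      omega
    · rw [if_neg hL]
      by_cases hR : hd = 'R'
      · subst hR
        rw [if_pos rfl, ih]
        simp [hL]
        omega
      · rw [if_neg hR]
        by_cases hD : hd = 'D'
        · subst hD
          rw [if_pos rfl, ih]
          simp [hL, hR]
          omega
        · rw [if_neg hD, ih]
          simp [hL, hR, hD]
          omega

-- ===== VERDICT (by name: the statement is the Claim_ definition above) =====
theorem routeCheck_spec : Claim_equal_routeCheck := by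
  intro s _
  unfold Spec_routeCheck routeCheck routeCheck_alt
  rw [fold_pos]
  simp only [PySem.Str.count_eq, PySem.Str.len_eq,
    show ("L" : String).toList = ['L'] from rfl,
    show ("R" : String).toList = ['R'] from rfl,
    show ("D" : String).toList = ['D'] from rfl,
    count_singleton]
  split_ifs with h
  · symm; rw [decide_eq_true_iff]; omega
  · symm; rw [decide_eq_false_iff_not]; omega
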